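-- pv_equiv track=rewrite | github.com/Lev-Excellenteam-2023/google-autocomplete-team-2 | first_try.py | search_consecutive_words
-- ===== SOURCE A (Python) =====
-- def search_consecutive_words(inverted_index, words):
--     # Convert the search words to lowercase (to match the indexing)
--     words = [word.lower() for word in words]
--
--     # Start with the positions of the first word
--     if words[0] not in inverted_index:
--         return []
--
--     result_positions = inverted_index[words[0]]
--
--     for i in range(1, len(words)):
--         word_positions = inverted_index.get(words[i], [])
--         next_result_positions = []
--
--         # Check each position in result_positions to see if the next word is consecutive
--         for file_name_1, line_number, position in result_positions:
--             # Find the corresponding next word position in the same file and line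
--             if (file_name_1, line_number, position + 1) in word_positions:
--                 next_result_positions.append((file_name_1, line_number, position + 1))
--
--         # Update the positions to the new filtered list
--         result_positions = next_result_positions
--
--     # Convert the result back to the format showing the start of the word sequence
--     final_results = [(file_name_1, line_number, position - len(words) + 1) for (file_name_1, line_number, position) in
--                      result_positions]
--
--     return final_results
-- ===== SOURCE B (Python) =====
-- def search_consecutive_words(inverted_index, words):
--     # Per-candidate probe with early exit instead of layer-by-layer filtering.
--     words = [word.lower() for word in words]
--
--     if words[0] not in inverted_index:
--         return []
--
--     def matches(file_name, line_number, position):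
--         for i in range(1, len(words)):
--             if (file_name, line_number, position + i) not in inverted_index.get(words[i], []):
--                 return False
--         return True
--
--     return [(f, l, p) for (f, l, p) in inverted_index[words[0]] if matches(f, l, p)]
-- ===== Notes on version B (the rewrite author's own statement) =====
-- stated objective: alternative
-- what changed: Replaces A's layer-by-layer filtering (one pass per word, rebuilding shifted intermediate position lists and shifting back at the end) with a single pass over the first word's positions, probing each candidate start against every later word with early exit on the first miss; no intermediate lists and no final position un-shifting.
import Mathlib
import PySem

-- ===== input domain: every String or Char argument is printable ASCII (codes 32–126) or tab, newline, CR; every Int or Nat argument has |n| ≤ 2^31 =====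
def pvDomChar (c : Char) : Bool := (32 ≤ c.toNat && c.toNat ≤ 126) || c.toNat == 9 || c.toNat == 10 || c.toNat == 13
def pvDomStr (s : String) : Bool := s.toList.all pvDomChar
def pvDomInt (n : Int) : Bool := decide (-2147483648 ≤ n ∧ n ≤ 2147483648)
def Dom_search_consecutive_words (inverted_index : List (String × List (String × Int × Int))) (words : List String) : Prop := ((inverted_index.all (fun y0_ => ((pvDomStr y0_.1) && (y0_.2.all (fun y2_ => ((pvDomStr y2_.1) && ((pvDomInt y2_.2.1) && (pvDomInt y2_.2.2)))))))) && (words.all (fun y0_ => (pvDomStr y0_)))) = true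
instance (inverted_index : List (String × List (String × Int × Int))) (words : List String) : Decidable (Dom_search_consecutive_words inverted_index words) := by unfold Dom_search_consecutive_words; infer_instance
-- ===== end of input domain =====

-- B replaces A's layer-by-layer filtering with a per-candidate probe with early exit (objective: alternative).

-- ===== PORT A =====
def search_consecutive_words (inverted_index : List (String × List (String × Int × Int))) (words : List String) : List (String × Int × Int) :=
  let d := PySem.Dict.mk inverted_index
  let ws := words.map PySem.Str.lower
  match ws with
  | [] => []   -- Python raises IndexError at words[0]; excluded by Pre_
  | w0 :: _ =>
    if d.contains w0 = false then []
    else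
      -- inverted_index[words[0]]: guarded by the contains test above, so getD never takes its default
      let init := d.getD w0 []
      let res := (PySem.List.pyRange 1 (ws.length : Int) 1).foldl
        (fun result i =>
          let wp := d.getD (PySem.List.pyGetD ws i "") []
          result.foldl (fun acc t =>
            if (t.1, t.2.1, t.2.2 + 1) ∈ wp then acc ++ [(t.1, t.2.1, t.2.2 + 1)] else acc) [])
        init
      res.map (fun t => (t.1, t.2.1, t.2.2 - (ws.length : Int) + 1))

-- ===== PORT B =====
-- the inner 'matches' loop of Source B: probe words[i], i = 1.., early exit on first miss
def scwProbe (d : PySem.Dict String (List (String × Int × Int))) (f : String) (l p : Int) : List String → Int → Bool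
  | [], _ => true
  | w :: rest, i =>
    if (f, l, p + i) ∈ d.getD w [] then scwProbe d f l p rest (i + 1) else false

def search_consecutive_words_alt (inverted_index : List (String × List (String × Int × Int))) (words : List String) : List (String × Int × Int) :=
  let d := PySem.Dict.mk inverted_index
  let ws := words.map PySem.Str.lower
  match ws with
  | [] => []   -- Python raises IndexError at words[0]; excluded by Pre_
  | w0 :: rest =>
    if d.contains w0 = false then []
    else (d.getD w0 []).filter (fun t => scwProbe d t.1 t.2.1 t.2.2 rest 1)

-- ===== PRECONDITION & SPEC =====
-- Pre_ excludes only words = [], where A raises IndexError at words[0].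
def Pre_search_consecutive_words (inverted_index : List (String × List (String × Int × Int))) (words : List String) : Prop := words ≠ []
instance (inverted_index : List (String × List (String × Int × Int))) (words : List String) : Decidable (Pre_search_consecutive_words inverted_index words) := by unfold Pre_search_consecutive_words; infer_instance

def pvWitness_search_consecutive_words : (List (String × List (String × Int × Int))) × List String :=
  ([("ab", [("f", 1, 0), ("f", 1, 3)]), ("cd", [("f", 1, 1)])], ["Ab", "cd"])

def Spec_search_consecutive_words (inverted_index : List (String × List (String × Int × Int))) (words : List String) (out : List (String × Int × Int)) : Prop := out = search_consecutive_words_alt inverted_index words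
instance (inverted_index : List (String × List (String × Int × Int))) (words : List String) (out : List (String × Int × Int)) : Decidable (Spec_search_consecutive_words inverted_index words out) := by unfold Spec_search_consecutive_words; infer_instance

-- ===== CLAIM (what is proved, stated in full; the proofs are below) =====
def Claim_equal_search_consecutive_words : Prop := ∀ (inverted_index : List (String × List (String × Int × Int))) (words : List String), Dom_search_consecutive_words inverted_index words → Pre_search_consecutive_words inverted_index words → Spec_search_consecutive_words inverted_index words (search_consecutive_words inverted_index words)

-- ===== LEMMAS AND PROOFS =====

-- probing rest from offset i+1 at base p is probing rest from offset i at base p+1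
theorem scwProbe_shift (d : PySem.Dict String (List (String × Int × Int))) (f : String) (l p : Int)
    (rest : List String) : ∀ i : Int, scwProbe d f l p rest (i + 1) = scwProbe d f l (p + 1) rest i := by
  induction rest with
  | nil => intro i; rfl
  | cons w ws ih =>
    intro i
    simp only [scwProbe]
    have h : p + (i + 1) = p + 1 + i := by ring
    rw [h, ih (i + 1)]

-- A's outer loop, already rewritten as a fold over the remaining words, equals
-- B's filter-by-probe followed by a shift of every surviving position by rest.length
theorem loopA_eq_filter_probe (d : PySem.Dict String (List (String × Int × Int))) :
    ∀ (rest : List String) (L : List (String × Int × Int)),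
      rest.foldl
        (fun result w =>
          result.foldl (fun acc t =>
            if (t.1, t.2.1, t.2.2 + 1) ∈ d.getD w [] then acc ++ [(t.1, t.2.1, t.2.2 + 1)] else acc) [])
        L
      = (L.filter (fun t => scwProbe d t.1 t.2.1 t.2.2 rest 1)).map
          (fun t => (t.1, t.2.1, t.2.2 + (rest.length : Int))) := by
  intro rest
  induction rest with
  | nil =>
    intro L
    simp [scwProbe]
  | cons w ws ih =>
    intro L
    simp only [List.foldl_cons]
    have hstep :
        L.foldl (fun acc t =>
            if (t.1, t.2.1, t.2.2 + 1) ∈ d.getD w [] then acc ++ [(t.1, t.2.1, t.2.2 + 1)] else acc) []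
          = (L.filter (fun t => decide ((t.1, t.2.1, t.2.2 + 1) ∈ d.getD w []))).map
              (fun t => (t.1, t.2.1, t.2.2 + 1)) := by
      have h := PySem.List.foldl_append_if (l := L) (acc := [])
        (fun t : String × Int × Int => decide ((t.1, t.2.1, t.2.2 + 1) ∈ d.getD w []))
        (fun t : String × Int × Int => (t.1, t.2.1, t.2.2 + 1))
      simpa using h
    rw [hstep, ih, List.filter_map, List.map_map, List.filter_filter]
    congr 1
    · funext t
      simp only [Function.comp]
      refine congrArg (fun z => (t.1, t.2.1, z)) ?_
      simp only [List.length_cons]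
      push_cast
      ring
    · apply List.filter_congr
      intro t _
      simp only [Function.comp]
      by_cases h : (t.1, t.2.1, t.2.2 + 1) ∈ d.getD w []
      · have hs := scwProbe_shift d t.1 t.2.1 t.2.2 ws 1
        simp [scwProbe, h, ← hs]
      · simp [scwProbe, h]

-- ===== VERDICT (by name: the statement is the Claim_ definition above) =====
theorem search_consecutive_words_spec : Claim_equal_search_consecutive_words := by
  intro inverted_index words _hdom hpre
  unfold Spec_search_consecutive_words
  unfold search_consecutive_words search_consecutive_words_alt
  cases hw : words.map PySem.Str.lower with
  | nil => exact absurd (List.map_eq_nil_iff.mp hw) hpre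
  | cons w0 rest =>
    simp only
    by_cases hc : (PySem.Dict.mk inverted_index).contains w0 = false
    · simp [hc]
    · rw [if_neg hc, if_neg hc]
      rw [PySem.List.foldl_pyRange_pyGetD' (w0 :: rest) ""
        (fun result w =>
          List.foldl (fun acc t =>
            if (t.1, t.2.1, t.2.2 + 1) ∈ (PySem.Dict.mk inverted_index).getD w [] then
              acc ++ [(t.1, t.2.1, t.2.2 + 1)]
            else acc) [] result)
        ((PySem.Dict.mk inverted_index).getD w0 []) (by norm_num : (0 : Int) ≤ 1)]
      simp only [show ((1 : Int).toNat) = 1 from rfl, List.drop_one, List.tail_cons]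
      rw [loopA_eq_filter_probe, List.map_map]
      refine Eq.trans (List.map_congr_left ?_) (List.map_id _)
      intro t _
      simp only [Function.comp, id]
      refine congrArg (fun z => (t.1, t.2.1, z)) ?_
      simp only [List.length_cons]
      push_cast
      ring
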